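-- pv_equiv track=rewrite | github.com/asztyber/EIM | isolability/pairwise_relationships.py | R_ES_UW
-- ===== SOURCE A (Python) =====
-- def R_ES_UW(ess, k, m):
--     ess_k = ess[k]
--     ess_m = ess[m]
--     for es1, es2 in ess_k:
--         if (es2, es1) not in ess_k:
--             if (es2, es1) in ess_m:
--                 return True
--     return False
-- ===== SOURCE B (Python) =====
-- def R_ES_UW(ess, k, m):
--     ess_k = ess[k]
--     ess_m = ess[m]
--     orient = {}
--     for a, b in ess_k:
--         if a != b:
--             key = (a, b) if a < b else (b, a)
--             orient.setdefault(key, set()).add(a < b)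
--     for x, y in ess_m:
--         if x != y:
--             key = (x, y) if x < y else (y, x)
--             if orient.get(key) == {y < x}:
--                 return True
--     return False
-- ===== Notes on version B (the rewrite author's own statement) =====
-- stated objective: alternative
-- what changed: Replaces A's single scan of ess[k] with nested list-membership tests by a two-phase algorithm: first build a dictionary indexing ess[k] by canonical (min,max) pair mapped to the set of orientations seen, then scan ess[m] once and report a hit when the reversed orientation set for a pair is exactly a singleton.
import Mathlib
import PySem

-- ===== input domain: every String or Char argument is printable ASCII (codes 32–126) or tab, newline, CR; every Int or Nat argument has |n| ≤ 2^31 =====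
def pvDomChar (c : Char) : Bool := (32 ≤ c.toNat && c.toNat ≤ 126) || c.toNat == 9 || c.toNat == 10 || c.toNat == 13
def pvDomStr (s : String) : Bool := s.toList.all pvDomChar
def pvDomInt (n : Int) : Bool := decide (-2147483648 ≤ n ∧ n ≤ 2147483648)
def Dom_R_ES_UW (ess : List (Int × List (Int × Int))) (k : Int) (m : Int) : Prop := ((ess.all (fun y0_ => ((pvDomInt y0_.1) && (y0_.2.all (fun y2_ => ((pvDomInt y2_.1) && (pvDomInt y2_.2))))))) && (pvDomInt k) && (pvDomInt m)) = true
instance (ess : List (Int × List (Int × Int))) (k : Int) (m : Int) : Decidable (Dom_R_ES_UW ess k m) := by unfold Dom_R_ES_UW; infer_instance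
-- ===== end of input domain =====

-- B replaces A's per-pair scan of ess[k] with nested membership tests by a two-phase algorithm:
-- index ess[k] by canonical (min,max) pair with the set of orientations seen, then scan ess[m]
-- once asking whether the reversed orientation set is exactly a singleton; same return value.

-- ===== PORT A =====
-- the 'for es1, es2 in ess_k' loop with its nested 'in' tests and early return
def aScan (essk essm : List (Int × Int)) : List (Int × Int) → Bool
  | [] => false
  | (es1, es2) :: rest =>
    if !(essk.contains (es2, es1)) then
      if essm.contains (es2, es1) then true
      else aScan essk essm rest
    else aScan essk essm rest

-- dict lookup ess[x]: first matching key (assoc-list convention); none = KeyError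
def dGet? (ess : List (Int × List (Int × Int))) (x : Int) : Option (List (Int × Int)) :=
  (ess.find? (fun p => p.1 == x)).map (·.2)

def R_ES_UW (ess : List (Int × List (Int × Int))) (k : Int) (m : Int) : Bool :=
  match dGet? ess k, dGet? ess m with
  | some essk, some essm => aScan essk essm essk
  | _, _ => false  -- KeyError in Python; excluded by Pre_

-- ===== PORT B =====
-- phase 1: 'for a, b in ess_k: if a != b: orient.setdefault(key, set()).add(a < b)'
def bIndex (essk : List (Int × Int)) : PySem.Dict (Int × Int) (PySem.Set Bool) :=
  essk.foldl
    (fun orient p =>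
      if p.1 != p.2 then
        orient.modify (if p.1 < p.2 then (p.1, p.2) else (p.2, p.1)) PySem.Set.empty
          (fun s => PySem.Set.add s (decide (p.1 < p.2)))
      else orient)
    PySem.Dict.empty

-- phase 2: 'for x, y in ess_m: if x != y: if orient.get(key) == {y < x}: return True'
def bScan (orient : PySem.Dict (Int × Int) (PySem.Set Bool)) : List (Int × Int) → Bool
  | [] => false
  | (x, y) :: rest =>
    if x != y then
      match orient.get? (if x < y then (x, y) else (y, x)) with
      | some s =>
        if PySem.Set.equal s (PySem.Set.ofList [decide (y < x)]) then true
        else bScan orient rest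
      | none => bScan orient rest  -- .get returns None; None == {…} is False
    else bScan orient rest

def R_ES_UW_alt (ess : List (Int × List (Int × Int))) (k : Int) (m : Int) : Bool :=
  (((List.lookup k ess).bind fun essk =>
      (List.lookup m ess).map fun essm => bScan (bIndex essk) essm)).getD
    false  -- none = KeyError in Python; excluded by Pre_

-- ===== PRECONDITION & SPEC =====
-- A raises KeyError when k or m is not a key of ess; Pre_ excludes exactly those inputs.
def Pre_R_ES_UW (ess : List (Int × List (Int × Int))) (k : Int) (m : Int) : Prop :=
  (List.lookup k ess).isSome ∧ (List.lookup m ess).isSome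
instance (ess : List (Int × List (Int × Int))) (k : Int) (m : Int) : Decidable (Pre_R_ES_UW ess k m) := by unfold Pre_R_ES_UW; infer_instance

def pvWitness_R_ES_UW : (List (Int × List (Int × Int))) × Int × Int :=
  ([(0, [(1, 2), (3, 3)]), (1, [(2, 1)])], 0, 1)

def Spec_R_ES_UW (ess : List (Int × List (Int × Int))) (k : Int) (m : Int) (out : Bool) : Prop := out = R_ES_UW_alt ess k m
instance (ess : List (Int × List (Int × Int))) (k : Int) (m : Int) (out : Bool) : Decidable (Spec_R_ES_UW ess k m out) := by unfold Spec_R_ES_UW; infer_instance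

-- ===== CLAIM (what is proved, stated in full; the proofs are below) =====
def Claim_equal_R_ES_UW : Prop := ∀ (ess : List (Int × List (Int × Int))) (k : Int) (m : Int), Dom_R_ES_UW ess k m → Pre_R_ES_UW ess k m → Spec_R_ES_UW ess k m (R_ES_UW ess k m)

-- ===== LEMMAS AND PROOFS =====

lemma dGet?_eq_lookup (ess : List (Int × List (Int × Int))) (x : Int) :
    dGet? ess x = List.lookup x ess := by
  induction ess with
  | nil => rfl
  | cons h t ih =>
    obtain ⟨a, v⟩ := h
    by_cases hx : x = a
    · simp [dGet?, List.lookup, List.find?, hx]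
    · have h1 : (a == x) = false := by simpa using Ne.symm hx
      have h2 : (x == a) = false := by simpa using hx
      simpa [dGet?, List.lookup, List.find?, h1, h2] using ih

-- the canonical key B builds for a pair
def pvCanon (a b : Int) : Int × Int := if a < b then (a, b) else (b, a)

lemma aScan_eq_any (essk essm l : List (Int × Int)) :
    aScan essk essm l = l.any (fun p => !(essk.contains (p.2, p.1)) && essm.contains (p.2, p.1)) := by
  induction l with
  | nil => rfl
  | cons h t ih =>
    obtain ⟨a, b⟩ := h
    simp only [aScan, List.any_cons, ih]
    by_cases h1 : (b, a) ∈ essk <;> by_cases h2 : (b, a) ∈ essm <;> simp [h1, h2]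

lemma bScan_eq_any (orient : PySem.Dict (Int × Int) (PySem.Set Bool)) (l : List (Int × Int)) :
    bScan orient l = l.any (fun p =>
      decide (p.1 ≠ p.2) &&
      (match orient.get? (pvCanon p.1 p.2) with
       | some s => PySem.Set.equal s (PySem.Set.ofList [decide (p.2 < p.1)])
       | none => false)) := by
  induction l with
  | nil => rfl
  | cons h t ih =>
    obtain ⟨x, y⟩ := h
    simp only [bScan, List.any_cons, ih, pvCanon]
    by_cases hxy : x = y
    · simp [hxy]
    · simp only [bne_iff_ne, ne_eq, hxy, not_false_eq_true, if_true, decide_true, Bool.true_and]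
      cases hg : orient.get? (if x < y then (x, y) else (y, x)) with
      | none => simp
      | some s =>
        by_cases he : PySem.Set.equal s (PySem.Set.ofList [decide (y < x)]) = true <;> simp [he]

-- membership of a flag in the built index, characterised over the fold
lemma bIndex_mem (essk : List (Int × Int)) (key : Int × Int) (f : Bool)
    (d : PySem.Dict (Int × Int) (PySem.Set Bool)) :
    f ∈ (essk.foldl
      (fun orient p =>
        if p.1 != p.2 then
          orient.modify (if p.1 < p.2 then (p.1, p.2) else (p.2, p.1)) PySem.Set.empty
            (fun s => PySem.Set.add s (decide (p.1 < p.2)))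
        else orient) d).getD key PySem.Set.empty ↔
    f ∈ d.getD key PySem.Set.empty ∨
      ∃ p ∈ essk, p.1 ≠ p.2 ∧ key = pvCanon p.1 p.2 ∧ f = decide (p.1 < p.2) := by
  induction essk generalizing d with
  | nil => simp
  | cons h t ih =>
    obtain ⟨a, b⟩ := h
    rw [List.foldl_cons, ih]
    by_cases hab : a = b
    · subst hab
      rw [if_neg (by simp)]
      simp only [List.mem_cons]
      constructor
      · rintro (h | ⟨p, hp, h1, h2, h3⟩)
        · exact Or.inl h
        · exact Or.inr ⟨p, Or.inr hp, h1, h2, h3⟩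
      · rintro (h | ⟨p, rfl | hp, h1, h2, h3⟩)
        · exact Or.inl h
        · exact absurd rfl h1
        · exact Or.inr ⟨p, hp, h1, h2, h3⟩
    · rw [if_pos (by simpa using hab), PySem.Dict.getD_modify,
        show (if a < b then (a, b) else (b, a)) = pvCanon a b from rfl]
      by_cases hk : key = pvCanon a b
      · subst hk
        rw [if_pos rfl]
        simp only [List.mem_cons]
        constructor
        · rintro (h | ⟨p, hp, h1, h2, h3⟩)
          · rcases (PySem.Set.mem_add _ _ _).mp h with h' | h'
            · exact Or.inl h'
            · exact Or.inr ⟨(a, b), Or.inl rfl, hab, rfl, h'⟩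
          · exact Or.inr ⟨p, Or.inr hp, h1, h2, h3⟩
        · rintro (h | ⟨p, rfl | hp, h1, h2, h3⟩)
          · exact Or.inl ((PySem.Set.mem_add _ _ _).mpr (Or.inl h))
          · exact Or.inl ((PySem.Set.mem_add _ _ _).mpr (Or.inr h3))
          · exact Or.inr ⟨p, hp, h1, h2, h3⟩
      · rw [if_neg hk]
        simp only [List.mem_cons]
        constructor
        · rintro (h | ⟨p, hp, h1, h2, h3⟩)
          · exact Or.inl h
          · exact Or.inr ⟨p, Or.inr hp, h1, h2, h3⟩
        · rintro (h | ⟨p, rfl | hp, h1, h2, h3⟩)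
          · exact Or.inl h
          · exact absurd h2 hk
          · exact Or.inr ⟨p, hp, h1, h2, h3⟩

-- a canonical key + orientation flag determines the pair
lemma pvCanon_inj (a b u v : Int)
    (hk : pvCanon u v = pvCanon a b) (hf : decide (u < v) = decide (a < b)) :
    u = a ∧ v = b := by
  simp only [pvCanon] at hk
  by_cases h1 : u < v <;> by_cases h2 : a < b
  · rw [if_pos h1, if_pos h2] at hk
    exact ⟨congrArg Prod.fst hk, congrArg Prod.snd hk⟩
  · simp [h1, h2] at hf
  · simp [h1, h2] at hf
  · rw [if_neg h1, if_neg h2] at hk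
    exact ⟨congrArg Prod.snd hk, congrArg Prod.fst hk⟩

lemma bIndex_char (essk : List (Int × Int)) (a b : Int) (hab : a ≠ b) :
    decide (a < b) ∈ (bIndex essk).getD (pvCanon a b) PySem.Set.empty ↔ (a, b) ∈ essk := by
  rw [bIndex, bIndex_mem]
  have hemp : decide (a < b) ∉
      (PySem.Dict.empty : PySem.Dict (Int × Int) (PySem.Set Bool)).getD (pvCanon a b)
        PySem.Set.empty := by
    simp [PySem.Dict.getD_empty, PySem.Set.empty]
  constructor
  · rintro (h | ⟨⟨u, v⟩, hp, h1, h2, h3⟩)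
    · exact absurd h hemp
    · obtain ⟨rfl, rfl⟩ := pvCanon_inj a b u v h2.symm h3.symm
      exact hp
  · intro h
    exact Or.inr ⟨(a, b), h, hab, rfl, rfl⟩

lemma equal_singleton_iff (s : PySem.Set Bool) (f : Bool) :
    PySem.Set.equal s (PySem.Set.ofList [f]) = true ↔ (f ∈ s ∧ (!f) ∉ s) := by
  rw [PySem.Set.equal_iff]
  constructor
  · intro h
    refine ⟨(h f).mpr ?_, fun hc => ?_⟩
    · simp [PySem.Set.mem_ofList]
    · have := (h (!f)).mp hc
      simp [PySem.Set.mem_ofList] at this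
  · rintro ⟨h1, h2⟩ t
    rcases Bool.eq_false_or_eq_true t with rfl | rfl <;>
      rcases Bool.eq_false_or_eq_true f with rfl | rfl <;>
      simp_all [PySem.Set.mem_ofList]

-- B's per-element test, in terms of membership in ess_k
lemma bTest_iff (essk : List (Int × Int)) (x y : Int) (hxy : x ≠ y) :
    (match (bIndex essk).get? (pvCanon x y) with
     | some s => PySem.Set.equal s (PySem.Set.ofList [decide (y < x)])
     | none => false) = true ↔ ((y, x) ∈ essk ∧ (x, y) ∉ essk) := by
  have hcomm : pvCanon y x = pvCanon x y := by
    simp only [pvCanon]; split_ifs <;> first | rfl | (exfalso; omega)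
  have hneg : decide (x < y) = !decide (y < x) := by
    by_cases h : y < x <;> simp [h] <;> omega
  have h1 := bIndex_char essk y x (Ne.symm hxy)
  have h2 := bIndex_char essk x y hxy
  rw [hcomm] at h1
  rw [PySem.Dict.getD_eq_get?_getD] at h1 h2
  cases hg : (bIndex essk).get? (pvCanon x y) with
  | none =>
    rw [hg] at h1
    simp only [Option.getD_none] at h1
    show false = true ↔ _
    constructor
    · intro h; simp at h
    · rintro ⟨hk, -⟩
      have := h1.mpr hk
      simp [PySem.Set.empty] at this
  | some s =>
    rw [hg] at h1 h2
    simp only [Option.getD_some] at h1 h2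
    show PySem.Set.equal s (PySem.Set.ofList [decide (y < x)]) = true ↔ _
    rw [equal_singleton_iff, ← hneg, h1, h2]

-- ===== VERDICT (by name: the statement is the Claim_ definition above) =====
theorem R_ES_UW_spec : Claim_equal_R_ES_UW := by
  intro ess k m _ hpre
  unfold Spec_R_ES_UW R_ES_UW R_ES_UW_alt
  cases hek : dGet? ess k with
  | none =>
    rw [dGet?_eq_lookup] at hek
    cases dGet? ess m <;> rw [hek] <;> rfl
  | some essk =>
    have hek' := hek; rw [dGet?_eq_lookup] at hek'
    cases hem : dGet? ess m with
    | none =>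
      have hem' := hem; rw [dGet?_eq_lookup] at hem'
      rw [hek', hem']
      rfl
    | some essm =>
      have hem' := hem; rw [dGet?_eq_lookup] at hem'
      rw [hek', hem']
      show aScan essk essm essk = bScan (bIndex essk) essm
      rw [aScan_eq_any, bScan_eq_any, Bool.eq_iff_iff]
      simp only [List.any_eq_true, Bool.and_eq_true, Bool.not_eq_true',
        List.contains_eq_mem, decide_eq_true_eq, decide_eq_false_iff_not]
      constructor
      · rintro ⟨⟨a, b⟩, hp, hnk, hm⟩
        have hab : a ≠ b := fun h => hnk (h ▸ hp)
        exact ⟨(b, a), hm, hab.symm, (bTest_iff essk b a hab.symm).mpr ⟨hp, hnk⟩⟩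
      · rintro ⟨⟨x, y⟩, hp, hxy, ht⟩
        obtain ⟨hk, hnk⟩ := (bTest_iff essk x y hxy).mp ht
        exact ⟨(y, x), hk, hnk, hp⟩
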